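-- pv_equiv track=rewrite | github.com/matteodelv/SNLPExercises | Assignment 1/utils.py | treatPunctuation
-- ===== SOURCE A (Python) =====
-- def treatPunctuation(line):
-- 	toBeStripped = ["\n", ",", ";", ":", "-"]
-- 	for v in toBeStripped:
-- 		line = line.replace(v, "")
-- 	endSentences = ["?", "!", "."]
-- 	for v in endSentences:
-- 		line = line.replace(v, " <eos> <sos>")
-- 	return line
-- ===== SOURCE B (Python) =====
-- def treatPunctuation(line):
-- 	strip = set("\n,;:-")
-- 	ends = set("?!.")
-- 	return "".join("" if ch in strip else (" <eos> <sos>" if ch in ends else ch) for ch in line)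
-- ===== Notes on version B (the rewrite author's own statement) =====
-- stated objective: alternative
-- what changed: Replaced the eight whole-string replace passes by a single pass over the characters that classifies each character as stripped, sentence-ending, or ordinary via set membership and joins the emitted pieces at the end.
import Mathlib
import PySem

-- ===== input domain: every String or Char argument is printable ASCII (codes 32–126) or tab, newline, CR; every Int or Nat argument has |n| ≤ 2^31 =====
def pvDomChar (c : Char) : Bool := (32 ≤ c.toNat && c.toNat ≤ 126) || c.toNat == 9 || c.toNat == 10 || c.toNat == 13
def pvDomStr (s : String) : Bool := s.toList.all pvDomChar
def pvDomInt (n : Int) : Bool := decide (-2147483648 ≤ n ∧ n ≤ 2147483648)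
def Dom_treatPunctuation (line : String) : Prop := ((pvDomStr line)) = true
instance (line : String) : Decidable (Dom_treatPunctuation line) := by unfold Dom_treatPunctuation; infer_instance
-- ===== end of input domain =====

-- B replaces A's eight whole-string replace passes by one pass over the characters with a
-- three-way classification; return values are proved equal on all of Dom.

-- ===== PORT A =====
def treatPunctuation (line : String) : String :=
  -- for v in toBeStripped: line = line.replace(v, "")
  let line := ["\n", ",", ";", ":", "-"].foldl (fun l v => PySem.Str.replace l v "") line
  -- for v in endSentences: line = line.replace(v, " <eos> <sos>")
  let line := ["?", "!", "."].foldl (fun l v => PySem.Str.replace l v " <eos> <sos>") line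
  line

-- ===== PORT B =====
-- 'ch in strip' for a set of single characters is membership of ch in the set's characters
def treatPunctuation_alt (line : String) : String :=
  let strip := PySem.Set.ofList "\n,;:-".toList
  let ends := PySem.Set.ofList "?!.".toList
  -- "".join(generator of string pieces) = flatMap of the pieces' characters
  String.ofList (line.toList.flatMap (fun ch =>
    if ch ∈ strip then [] else if ch ∈ ends then " <eos> <sos>".toList else [ch]))

-- ===== PRECONDITION & SPEC =====
def Spec_treatPunctuation (line : String) (out : String) : Prop := out = treatPunctuation_alt line
instance (line : String) (out : String) : Decidable (Spec_treatPunctuation line out) := by unfold Spec_treatPunctuation; infer_instance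

-- ===== CLAIM (what is proved, stated in full; the proofs are below) =====
def Claim_equal_treatPunctuation : Prop := ∀ (line : String), Dom_treatPunctuation line → Spec_treatPunctuation line (treatPunctuation line)

-- ===== LEMMAS AND PROOFS =====

-- ===== VERDICT (by name: the statement is the Claim_ definition above) =====
-- replace with a single-character pattern is a flatMap over the characters
theorem go_single (c : Char) (new : List Char) :
    ∀ (l : List Char) (fuel : Nat) (acc : List Char), l.length ≤ fuel →
      PySem.Chars.replace.go [c] new fuel l acc =
        acc.reverse ++ l.flatMap (fun x => if x = c then new else [x]) := by
  intro l
  induction l with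
  | nil => intro fuel acc _; cases fuel <;> simp [PySem.Chars.replace.go]
  | cons x t ih =>
    intro fuel acc h
    cases fuel with
    | zero => simp at h
    | succ fuel =>
      by_cases hx : x = c
      · rw [show PySem.Chars.replace.go [c] new (fuel+1) (x :: t) acc
            = PySem.Chars.replace.go [c] new fuel (List.drop 1 (x :: t)) (new.reverse ++ acc) by
          simp [PySem.Chars.replace.go, List.isPrefixOf, hx, eq_comm]]
        rw [List.drop_one, List.tail_cons, ih fuel (new.reverse ++ acc) (by simp only [List.length_cons] at h; omega)]
        simp [hx]
      · rw [show PySem.Chars.replace.go [c] new (fuel+1) (x :: t) acc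
            = PySem.Chars.replace.go [c] new fuel t (x :: acc) by
          simp [PySem.Chars.replace.go, List.isPrefixOf, hx, Ne.symm hx]]
        rw [ih fuel (x :: acc) (by simp only [List.length_cons] at h; omega)]
        simp [hx]

theorem replace_single (s : List Char) (c : Char) (new : List Char) :
    PySem.Chars.replace s [c] new = s.flatMap (fun x => if x = c then new else [x]) := by
  simp [PySem.Chars.replace, go_single c new s (s.length) [] (le_refl _)]

set_option maxHeartbeats 1000000 in
theorem treatPunctuation_spec : Claim_equal_treatPunctuation := by
  intro line _
  unfold Spec_treatPunctuation treatPunctuation treatPunctuation_alt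
  apply String.toList_inj.mp
  simp only [List.foldl, PySem.Str.toList_replace, String.toList_ofList]
  simp only [show ("\n" : String).toList = ['\n'] from rfl, show ("," : String).toList = [','] from rfl,
    show (";" : String).toList = [';'] from rfl, show (":" : String).toList = [':'] from rfl,
    show ("-" : String).toList = ['-'] from rfl, show ("?" : String).toList = ['?'] from rfl,
    show ("!" : String).toList = ['!'] from rfl, show ("." : String).toList = ['.'] from rfl]
  simp only [replace_single, List.flatMap_assoc]
  apply List.flatMap_congr
  intro x _
  by_cases h1 : x = '\n' <;> by_cases h2 : x = ',' <;> by_cases h3 : x = ';' <;>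
    by_cases h4 : x = ':' <;> by_cases h5 : x = '-' <;> by_cases h6 : x = '?' <;>
    by_cases h7 : x = '!' <;> by_cases h8 : x = '.' <;>
    simp_all [PySem.Set.ofList, PySem.Set.mem_ofList] <;> decide
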